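-- pv_equiv track=rewrite | github.com/Kudrat10/IITM-Python-1-Grpa | Week 7  Data Processing 3 - Function Type.py | find_longest_antakshari_subsequence
-- ===== SOURCE A (Python) =====
-- def find_longest_antakshari_subsequence(sequence: str) -> int:
--     words = sequence.split(',')
--     n = len(words)
--
--     # Initialize variables to track the longest subsequence
--     max_length = 1
--     current_length = 1
--
--     # Traverse through the words and check the antakshari property
--     for i in range(1, n):
--         if words[i-1][-1] == words[i][0]:
--             current_length += 1
--         else:
--             max_length = max(max_length, current_length)
--             current_length = 1
--
--     # Final check in case the longest subsequence ends at the last word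
--     max_length = max(max_length, current_length)
--
--     return max_length
-- ===== SOURCE B (Python) =====
-- def find_longest_antakshari_subsequence(sequence: str) -> int:
--     words = sequence.split(',')
--     # adjacency flags, built eagerly left-to-right
--     linked = [words[i - 1][-1] == words[i][0] for i in range(1, len(words))]
--     # boundaries: virtual start, every broken link, virtual end;
--     # the longest chain is the widest gap between consecutive boundaries
--     bounds = [-1] + [i for i, f in enumerate(linked) if not f] + [len(linked)]
--     return max(b - a for a, b in zip(bounds, bounds[1:]))
-- ===== Notes on version B (the rewrite author's own statement) =====
-- stated objective: alternative
-- what changed: Instead of A's running-max state machine over the word list, B first materialises the chain-link flags, collects the positions of broken links as boundaries, and returns the widest gap between consecutive boundaries.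
import Mathlib
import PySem

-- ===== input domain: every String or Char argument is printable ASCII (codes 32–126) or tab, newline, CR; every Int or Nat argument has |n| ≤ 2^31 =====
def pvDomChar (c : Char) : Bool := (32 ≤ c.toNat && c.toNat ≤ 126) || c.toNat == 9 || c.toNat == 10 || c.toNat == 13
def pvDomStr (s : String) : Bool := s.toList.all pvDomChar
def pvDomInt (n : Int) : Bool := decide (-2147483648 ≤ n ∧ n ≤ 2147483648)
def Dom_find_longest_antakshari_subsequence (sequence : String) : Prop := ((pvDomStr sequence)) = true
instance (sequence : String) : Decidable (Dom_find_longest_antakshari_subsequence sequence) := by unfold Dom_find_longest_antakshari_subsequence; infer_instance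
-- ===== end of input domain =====

-- B replaces A's running-max state machine by a boundary-gap computation over the broken-link
-- positions (objective: alternative decomposition, same cost).

-- ===== PORT A =====
def find_longest_antakshari_subsequence (sequence : String) : Int :=
  let words := PySem.Chars.splitOn sequence.toList [',']
  let n : Int := words.length
  let st := (PySem.List.pyRange 1 n 1).foldl
    (fun (p : Int × Int) i =>
      if PySem.List.pyGetD (PySem.List.pyGetD words (i - 1) []) (-1) ' ' ==
         PySem.List.pyGetD (PySem.List.pyGetD words i []) 0 ' '
      then (p.1, p.2 + 1)
      else (max p.1 p.2, 1))
    ((1 : Int), (1 : Int))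
  max st.1 st.2

-- ===== PORT B =====
def find_longest_antakshari_subsequence_alt (sequence : String) : Int :=
  let words := PySem.Chars.splitOn sequence.toList [',']
  let linked := (PySem.List.pyRange 1 (words.length : Int) 1).map
    (fun i =>
      PySem.List.pyGetD (PySem.List.pyGetD words (i - 1) []) (-1) ' ' ==
      PySem.List.pyGetD (PySem.List.pyGetD words i []) 0 ' ')
  let bounds : List Int :=
    [-1] ++ (PySem.List.enumerate linked 0).filterMap
      (fun p => if !p.2 then some p.1 else none) ++ [(linked.length : Int)]
  let gaps := (bounds.zip (PySem.List.slice bounds (some 1) none)).map (fun p => p.2 - p.1)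
  -- bounds has ≥ 2 elements, so gaps is never empty and Python's max never raises
  (PySem.List.max? gaps (fun x => x)).getD 0

-- ===== PRECONDITION & SPEC =====
-- Pre_ excludes exactly the inputs on which the Python A raises IndexError: a sequence that
-- splits into at least two comma-separated pieces one of which is empty (B raises there too).
def Pre_find_longest_antakshari_subsequence (sequence : String) : Prop :=
  (PySem.Chars.splitOn sequence.toList [',']).length ≤ 1 ∨
  ∀ w ∈ PySem.Chars.splitOn sequence.toList [','], w ≠ []
instance (sequence : String) : Decidable (Pre_find_longest_antakshari_subsequence sequence) := by
  unfold Pre_find_longest_antakshari_subsequence; infer_instance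

def pvWitness_find_longest_antakshari_subsequence : String := "ab,bc,cd,xy"

def Spec_find_longest_antakshari_subsequence (sequence : String) (out : Int) : Prop := out = find_longest_antakshari_subsequence_alt sequence
instance (sequence : String) (out : Int) : Decidable (Spec_find_longest_antakshari_subsequence sequence out) := by unfold Spec_find_longest_antakshari_subsequence; infer_instance

-- ===== CLAIM (what is proved, stated in full; the proofs are below) =====
def Claim_equal_find_longest_antakshari_subsequence : Prop := ∀ (sequence : String), Dom_find_longest_antakshari_subsequence sequence → Pre_find_longest_antakshari_subsequence sequence → Spec_find_longest_antakshari_subsequence sequence (find_longest_antakshari_subsequence sequence)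

-- ===== LEMMAS AND PROOFS =====

-- A's loop body, abstracted over the link flag
def pvStep (p : Int × Int) (t : Bool) : Int × Int :=
  if t then (p.1, p.2 + 1) else (max p.1 p.2, 1)

-- positions (counted from s) of the broken links
def pvFp (L : List Bool) (s : Int) : List Int :=
  (PySem.List.enumerate L s).filterMap (fun p => if !p.2 then some p.1 else none)

-- consecutive gaps of (prev :: xs)
def pvGaps (prev : Int) : List Int → List Int
  | [] => []
  | x :: t => (x - prev) :: pvGaps x t

-- largest gap (0 for the empty list, which never occurs)
def pvM (prev : Int) (xs : List Int) : Int :=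
  match pvGaps prev xs with
  | [] => 0
  | g :: t => t.foldl max g

theorem pv_foldl_max_comm (gs : List Int) (a g : Int) :
    gs.foldl max (max a g) = max a (gs.foldl max g) := by
  induction gs generalizing g with
  | nil => rfl
  | cons x t ih => simpa [List.foldl, max_assoc] using ih (max g x)

theorem pvM_cons (prev x : Int) (t : List Int) (h : t ≠ []) :
    pvM prev (x :: t) = max (x - prev) (pvM x t) := by
  cases t with
  | nil => exact absurd rfl h
  | cons y t' => simp [pvM, pvGaps, List.foldl, pv_foldl_max_comm]

theorem pvFp_cons_true (L : List Bool) (s : Int) :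
    pvFp (true :: L) s = pvFp L (s + 1) := by
  simp [pvFp, PySem.List.enumerate_cons]

theorem pvFp_cons_false (L : List Bool) (s : Int) :
    pvFp (false :: L) s = s :: pvFp L (s + 1) := by
  simp [pvFp, PySem.List.enumerate_cons]

theorem pvFp_ge (L : List Bool) (s : Int) : ∀ x ∈ pvFp L s, s ≤ x := by
  induction L generalizing s with
  | nil => simp [pvFp, PySem.List.enumerate_nil]
  | cons b L ih =>
    intro x hx
    cases b with
    | true =>
      rw [pvFp_cons_true] at hx
      have := ih (s + 1) x hx; omega
    | false =>
      rw [pvFp_cons_false] at hx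
      rcases List.mem_cons.mp hx with h | h
      · omega
      · have := ih (s + 1) x h; omega

-- the main invariant: A's state machine equals the max-gap over broken-link boundaries
theorem pv_main (L : List Bool) (m c s : Int) :
    max (L.foldl pvStep (m, c)).1 (L.foldl pvStep (m, c)).2 =
    max m (pvM (s - c) (pvFp L s ++ [s + L.length])) := by
  induction L generalizing m c s with
  | nil =>
    have h : pvM (s - c) (pvFp ([] : List Bool) s ++ [s + (([] : List Bool).length : Int)]) = c := by
      simp [pvM, pvFp, PySem.List.enumerate_nil, pvGaps]
    rw [h]
    rfl
  | cons b L ih =>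
    cases b with
    | true =>
      have hstep : pvStep (m, c) true = (m, c + 1) := by simp [pvStep]
      have h1 : s - c = (s + 1) - (c + 1) := by ring
      have h2 : s + ((true :: L).length : Int) = (s + 1) + (L.length : Int) := by
        push_cast [List.length_cons]; ring
      rw [List.foldl_cons, hstep, pvFp_cons_true, h1, h2]
      exact ih m (c + 1) (s + 1)
    | false =>
      have hstep : pvStep (m, c) false = (max m c, 1) := by simp [pvStep]
      have hne : pvFp L (s + 1) ++ [s + ((false :: L).length : Int)] ≠ [] := by
        simp
      rw [List.foldl_cons, hstep, pvFp_cons_false, List.cons_append,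
        pvM_cons _ _ _ hne]
      have h2 : s + ((false :: L).length : Int) = (s + 1) + (L.length : Int) := by
        push_cast [List.length_cons]; ring
      have h3 : s - (s - c) = c := by ring
      rw [h2, h3]
      have hih := ih (max m c) 1 (s + 1)
      have h4 : s + 1 - 1 = s := by ring
      rw [h4] at hih
      rw [hih, max_assoc]

-- B's zip-of-shifted-lists gap construction is pvGaps
theorem pv_zip_gaps (X : List Int) (prev : Int) :
    ((prev :: X).zip X).map (fun p : Int × Int => p.2 - p.1) = pvGaps prev X := by
  induction X generalizing prev with
  | nil => rfl
  | cons x t ih =>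
    rw [List.zip_cons_cons, List.map_cons, ih x, pvGaps]

-- B's max over the gaps is pvM, for a nonempty boundary tail
theorem pv_maxgaps (X : List Int) (prev : Int) (h : X ≠ []) :
    (PySem.List.max? (((prev :: X).zip X).map (fun p : Int × Int => p.2 - p.1))
        (fun x => x)).getD 0 = pvM prev X := by
  rw [pv_zip_gaps]
  cases X with
  | nil => exact absurd rfl h
  | cons x t =>
    rw [pvM]
    simp [pvGaps, PySem.List.max?_id_cons]

theorem pv_one_le (L : List Bool) :
    1 ≤ pvM (-1) (pvFp L 0 ++ [(L.length : Int)]) := by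
  cases hfp : pvFp L 0 with
  | nil =>
    rw [List.nil_append]
    have h : pvM (-1) [(L.length : Int)] = (L.length : Int) + 1 := by
      simp [pvM, pvGaps]
    rw [h]
    omega
  | cons x t =>
    have hx : (0 : Int) ≤ x := by
      have := pvFp_ge L 0 x (by rw [hfp]; exact List.mem_cons_self ..)
      omega
    rw [List.cons_append, pvM_cons _ _ _ (by simp)]
    have h1 : (1 : Int) ≤ x - (-1) := by omega
    exact le_trans h1 (le_max_left _ _)

-- ===== VERDICT (by name: the statement is the Claim_ definition above) =====
theorem find_longest_antakshari_subsequence_spec : Claim_equal_find_longest_antakshari_subsequence := by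
  intro sequence _ _
  unfold Spec_find_longest_antakshari_subsequence
  simp only [find_longest_antakshari_subsequence, find_longest_antakshari_subsequence_alt]
  set words := PySem.Chars.splitOn sequence.toList [','] with hw
  set f : Int → Bool := fun i =>
      PySem.List.pyGetD (PySem.List.pyGetD words (i - 1) []) (-1) ' ' ==
      PySem.List.pyGetD (PySem.List.pyGetD words i []) 0 ' ' with hf
  set L : List Bool := (PySem.List.pyRange 1 (words.length : Int) 1).map f with hL
  have hA : (PySem.List.pyRange 1 (words.length : Int) 1).foldl
      (fun (p : Int × Int) i =>
        if PySem.List.pyGetD (PySem.List.pyGetD words (i - 1) []) (-1) ' ' ==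
           PySem.List.pyGetD (PySem.List.pyGetD words i []) 0 ' '
        then (p.1, p.2 + 1)
        else (max p.1 p.2, 1)) ((1 : Int), (1 : Int)) = L.foldl pvStep (1, 1) := by
    rw [hL, List.foldl_map]
    rfl
  rw [hA]
  have hmain := pv_main L 1 1 0
  have h0 : (0 : Int) - 1 = -1 := by ring
  have hz : (0 : Int) + (L.length : Int) = (L.length : Int) := by ring
  rw [h0, hz] at hmain
  rw [hmain]
  have hb : ([(-1 : Int)] ++ (PySem.List.enumerate L 0).filterMap
      (fun p => if !p.2 then some p.1 else none) ++ [(L.length : Int)]) =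
      (-1 : Int) :: (pvFp L 0 ++ [(L.length : Int)]) := by
    simp [pvFp]
  rw [hb]
  have hslice : PySem.List.slice ((-1 : Int) :: (pvFp L 0 ++ [(L.length : Int)]))
      (some 1) none = pvFp L 0 ++ [(L.length : Int)] := by
    rw [PySem.List.slice_from_one]
    rfl
  rw [hslice, pv_maxgaps _ _ (by simp)]
  have hone := pv_one_le L
  omega
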